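-- pv_equiv track=rewrite | github.com/anderssh/advent_of_code_2020 | day_10.py | get_joltage_differences
-- ===== SOURCE A (Python) =====
-- def get_joltage_differences(joltage_list):
--     worklist = joltage_list[:]
--     worklist.append(0)
--     worklist.append(max(worklist)+3)
--     diff_list = []
--     for i in range(len(worklist)-1):
--             min_joltage_in_list = min(worklist)
--             worklist.remove(min_joltage_in_list)
--             diff_list.append(abs(min_joltage_in_list - min(worklist)))
--     return diff_list
-- ===== SOURCE B (Python) =====
-- def get_joltage_differences(joltage_list):
--     s = sorted(joltage_list + [0, max(joltage_list + [0]) + 3])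
--     return [b - a for a, b in zip(s, s[1:])]
-- ===== Notes on version B (the rewrite author's own statement) =====
-- stated objective: faster
-- what changed: Replaces A's repeated full-list min-scan-and-remove loop with a single sort followed by one pass of adjacent differences.
import Mathlib
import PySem

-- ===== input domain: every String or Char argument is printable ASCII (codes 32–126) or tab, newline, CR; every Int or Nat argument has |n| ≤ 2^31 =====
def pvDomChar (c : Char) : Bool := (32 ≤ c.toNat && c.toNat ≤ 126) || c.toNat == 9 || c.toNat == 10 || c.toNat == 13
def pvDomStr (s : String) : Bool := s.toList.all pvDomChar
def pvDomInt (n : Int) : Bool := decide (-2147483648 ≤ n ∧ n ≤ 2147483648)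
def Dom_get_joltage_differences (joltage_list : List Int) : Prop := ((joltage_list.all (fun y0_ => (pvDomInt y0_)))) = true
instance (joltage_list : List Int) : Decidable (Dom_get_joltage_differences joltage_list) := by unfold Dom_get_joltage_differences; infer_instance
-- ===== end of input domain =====

-- B replaces A's repeated full-list min-scan-and-remove with one sort plus a single
-- adjacent-differences pass (asymptotically faster).

-- ===== PORT A =====
-- A's loop body: pick min, remove its first occurrence, record |min - new min|.
-- The .getD fallbacks are unreachable in A's loop (the worklist always stays nonempty
-- and the minimum is always a member), matching Python which never raises here.
def pvStepA (st : List Int × List Int) : List Int × List Int :=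
  let w := st.1
  let m := (PySem.List.min? w (fun x => x)).getD 0
  let w' := (PySem.List.remove? w m).getD w
  (w', st.2 ++ [|m - (PySem.List.min? w' (fun x => x)).getD 0|])

def get_joltage_differences (joltage_list : List Int) : List Int :=
  let worklist := joltage_list ++ [0]
  let worklist := worklist ++ [(PySem.List.max? worklist (fun x => x)).getD 0 + 3]
  ((PySem.List.pyRange 0 ((worklist.length : Int) - 1) 1).foldl
    (fun st _ => pvStepA st) (worklist, [])).2

-- ===== PORT B =====
def get_joltage_differences_alt (joltage_list : List Int) : List Int :=
  let s := PySem.List.sorted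
    (joltage_list ++ [0, (PySem.List.max? (joltage_list ++ [0]) (fun x => x)).getD 0 + 3])
    (fun x => x) false
  List.zipWith (fun a b => b - a) s s.tail

-- ===== PRECONDITION & SPEC =====
def Spec_get_joltage_differences (joltage_list : List Int) (out : List Int) : Prop := out = get_joltage_differences_alt joltage_list
instance (joltage_list : List Int) (out : List Int) : Decidable (Spec_get_joltage_differences joltage_list out) := by unfold Spec_get_joltage_differences; infer_instance

-- ===== CLAIM (what is proved, stated in full; the proofs are below) =====
def Claim_equal_get_joltage_differences : Prop := ∀ (joltage_list : List Int), Dom_get_joltage_differences joltage_list → Spec_get_joltage_differences joltage_list (get_joltage_differences joltage_list)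

-- ===== LEMMAS AND PROOFS =====

theorem pv_foldl_const {α β : Type} (g : α → α) (l : List β) (st : α) :
    l.foldl (fun s _ => g s) st = g^[l.length] st := by
  induction l generalizing st with
  | nil => rfl
  | cons x xs ih => simp [List.foldl_cons, ih, Function.iterate_succ_apply]

-- the head of sorted w is min(w)
theorem pv_min_eq_head_sorted (w : List Int) (m : Int) (t : List Int)
    (h : PySem.List.sorted w (fun x => x) false = m :: t) :
    PySem.List.min? w (fun x => x) = some m := by
  have hmem : m ∈ w := by
    rw [← PySem.List.mem_sorted w (fun x => x) false m, h]; exact List.mem_cons_self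
  have hne : w ≠ [] := List.ne_nil_of_mem hmem
  obtain ⟨m', hm'⟩ : ∃ m', PySem.List.min? w (fun x => x) = some m' := by
    cases hmin : PySem.List.min? w (fun x => x) with
    | none => exact absurd ((PySem.List.min?_eq_none_iff w (fun x => x)).mp hmin) hne
    | some m' => exact ⟨m', rfl⟩
  have hle : ∀ y ∈ w, m' ≤ y := PySem.List.min?_isMin hm'
  have hge : ∀ y ∈ w, m ≤ y := PySem.List.key_head_sorted_le w (fun x => x) h
  have : m' = m := le_antisymm (hle m hmem) (hge m' (PySem.List.min?_mem hm'))
  rw [hm', this]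

-- removing the minimum removes the head of the sorted order
theorem pv_erase_min_sorted (w : List Int) (m : Int) (t : List Int)
    (h : PySem.List.sorted w (fun x => x) false = m :: t) :
    PySem.List.sorted (w.erase m) (fun x => x) false = t := by
  have hperm : (m :: t).Perm w := by rw [← h]; exact PySem.List.sorted_perm w _ _
  have hperase : t.Perm (w.erase m) := by
    have := hperm.erase m
    simpa using this
  have hpair : t.Pairwise (fun a b => a ≤ b) := by
    have := PySem.List.sorted_pairwise w (fun x => x)
    rw [h] at this
    exact this.of_cons
  exact PySem.List.sorted_id_eq_of_perm_of_pairwise (w.erase m) t hperase hpair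

-- A's iterated loop produces the adjacent differences of the sorted worklist
theorem pv_loop (k : Nat) : ∀ (w ds : List Int), w.length = k + 1 →
    (pvStepA^[k] (w, ds)).2
      = ds ++ (let s := PySem.List.sorted w (fun x => x) false;
               List.zipWith (fun a b => b - a) s s.tail) := by
  induction k with
  | zero =>
    intro w ds hw
    have hs : (PySem.List.sorted w (fun x => x) false).length = 1 := by
      rw [PySem.List.length_sorted, hw]
    obtain ⟨a, ha⟩ := List.length_eq_one_iff.mp hs
    simp [ha]
  | succ k ih =>
    intro w ds hw
    have hslen : (PySem.List.sorted w (fun x => x) false).length = k + 2 := by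
      rw [PySem.List.length_sorted, hw]
    obtain ⟨m, next, t, hs⟩ : ∃ m next t, PySem.List.sorted w (fun x => x) false = m :: next :: t := by
      cases hss : PySem.List.sorted w (fun x => x) false with
      | nil => rw [hss] at hslen; simp at hslen
      | cons m rest =>
        cases rest with
        | nil => rw [hss] at hslen; simp at hslen
        | cons next t => exact ⟨m, next, t, rfl⟩
    have hmin : PySem.List.min? w (fun x => x) = some m := pv_min_eq_head_sorted w m _ hs
    have hmem : m ∈ w := by
      rw [← PySem.List.mem_sorted w (fun x => x) false m, hs]; exact List.mem_cons_self
    have hrem : PySem.List.remove? w m = some (w.erase m) := PySem.List.remove?_eq_some_erase w m hmem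
    have hsort' : PySem.List.sorted (w.erase m) (fun x => x) false = next :: t :=
      pv_erase_min_sorted w m _ hs
    have hmin' : PySem.List.min? (w.erase m) (fun x => x) = some next :=
      pv_min_eq_head_sorted _ next t hsort'
    have hmle : m ≤ next := by
      have := PySem.List.sorted_pairwise w (fun x => x)
      rw [hs] at this
      exact (List.pairwise_cons.mp this).1 next List.mem_cons_self
    have hstep : pvStepA (w, ds) = (w.erase m, ds ++ [next - m]) := by
      simp [pvStepA, hmin, hrem, hmin', abs_of_nonpos (by omega : m - next ≤ 0)]
    have hlen' : (w.erase m).length = k + 1 := by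
      rw [List.length_erase_of_mem hmem, hw]; omega
    rw [Function.iterate_succ_apply, hstep, ih _ _ hlen', hsort', hs]
    simp

theorem get_joltage_differences_eq (jl : List Int) :
    get_joltage_differences jl = get_joltage_differences_alt jl := by
  show ((PySem.List.pyRange 0 (((jl ++ [0] ++ [(PySem.List.max? (jl ++ [0]) (fun x => x)).getD 0 + 3]).length : Int) - 1) 1).foldl
      (fun st _ => pvStepA st)
      (jl ++ [0] ++ [(PySem.List.max? (jl ++ [0]) (fun x => x)).getD 0 + 3], [])).2
    = (let s := PySem.List.sorted
        (jl ++ [0, (PySem.List.max? (jl ++ [0]) (fun x => x)).getD 0 + 3]) (fun x => x) false;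
       List.zipWith (fun a b => b - a) s s.tail)
  set M := (PySem.List.max? (jl ++ [0]) (fun x => x)).getD 0 with hM
  rw [pv_foldl_const, PySem.List.length_pyRange_one]
  have h1 : ((jl ++ [0] ++ [M + 3]).length : Int) - 1 - 0 = (jl.length : Int) + 1 := by
    simp; omega
  rw [h1]
  have h2 : ((jl.length : Int) + 1).toNat = jl.length + 1 := by omega
  rw [h2, pv_loop (jl.length + 1) (jl ++ [0] ++ [M + 3]) [] (by simp)]
  have hassoc : jl ++ [0] ++ [M + 3] = jl ++ [0, M + 3] := by simp
  rw [hassoc]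
  simp

-- ===== VERDICT (by name: the statement is the Claim_ definition above) =====
theorem get_joltage_differences_spec : Claim_equal_get_joltage_differences := by
  intro jl _
  unfold Spec_get_joltage_differences
  exact get_joltage_differences_eq jl
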